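-- pv_equiv track=rewrite | github.com/mdomina/ForgeNPU | create_npu/golden_model.py | _load_tile_operands
-- ===== SOURCE A (Python) =====
-- from typing import Dict, List, Tuple
--
-- def _load_tile_operands(
--     prev_activation_regs: List[List[int]],
--     prev_weight_regs: List[List[int]],
--     activations_west: List[int],
--     weights_north: List[int],
--     rows: int,
--     cols: int,
--     preload_en: bool,
--     transpose_inputs: bool,
-- ) -> Tuple[List[List[int]], List[List[int]]]:
--     next_activations = [[0 for _ in range(cols)] for _ in range(rows)]
--     next_weights = [[0 for _ in range(cols)] for _ in range(rows)]
--
--     if preload_en: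
--         for row in range(rows):
--             for col in range(cols):
--                 if transpose_inputs:
--                     next_activations[row][col] = (
--                         int(weights_north[row]) if row < len(weights_north) else 0
--                     )
--                     next_weights[row][col] = (
--                         int(activations_west[col]) if col < len(activations_west) else 0
--                     )
--                 else:
--                     next_activations[row][col] = (
--                         int(activations_west[row]) if row < len(activations_west) else 0
--                     )
--                     next_weights[row][col] = (
--                         int(weights_north[col]) if col < len(weights_north) else 0
--                     )
--         return next_activations, next_weights
--
--     for row in range(rows):
--         for col in range(cols):
--             if col == 0:
--                 next_activations[row][col] = (
--                     int(weights_north[row])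
--                     if transpose_inputs and row < len(weights_north)
--                     else int(activations_west[row]) if row < len(activations_west) else 0
--                 )
--             else:
--                 next_activations[row][col] = prev_activation_regs[row][col - 1]
--
--     for row in range(rows):
--         for col in range(cols):
--             if row == 0:
--                 next_weights[row][col] = (
--                     int(activations_west[col])
--                     if transpose_inputs and col < len(activations_west)
--                     else int(weights_north[col]) if col < len(weights_north) else 0
--                 )
--             else:
--                 next_weights[row][col] = prev_weight_regs[row - 1][col]
--
--     return next_activations, next_weights
-- ===== SOURCE B (Python) =====
-- from typing import List, Tuple
--
--
-- def _load_tile_operands(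
--     prev_activation_regs: List[List[int]],
--     prev_weight_regs: List[List[int]],
--     activations_west: List[int],
--     weights_north: List[int],
--     rows: int,
--     cols: int,
--     preload_en: bool,
--     transpose_inputs: bool,
-- ) -> Tuple[List[List[int]], List[List[int]]]:
--     R = max(rows, 0)
--     C = max(cols, 0)
--     n_aw = len(activations_west)
--     n_wn = len(weights_north)
--
--     if preload_en:
--         # Broadcast: each activation row is one value repeated; all weight rows equal one vector.
--         if transpose_inputs:
--             row_vals = [int(weights_north[r]) if r < n_wn else 0 for r in range(R)]
--             col_vals = [int(activations_west[c]) if c < n_aw else 0 for c in range(C)]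
--         else:
--             row_vals = [int(activations_west[r]) if r < n_aw else 0 for r in range(R)]
--             col_vals = [int(weights_north[c]) if c < n_wn else 0 for c in range(C)]
--         return [[v] * C for v in row_vals], [list(col_vals) for _ in range(R)]
--
--     # Streaming: each activation row is its edge value followed by a one-step shift of the
--     # previous activation row; the weight tile is the edge row on top of the previous rows.
--     def act_edge(r: int) -> int:
--         if transpose_inputs and r < n_wn:
--             return int(weights_north[r])
--         return int(activations_west[r]) if r < n_aw else 0
--
--     def w_edge(c: int) -> int:
--         if transpose_inputs and c < n_aw:
--             return int(activations_west[c])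
--         return int(weights_north[c]) if c < n_wn else 0
--
--     acts = []
--     for r in range(R):
--         if C > 0:
--             tail = prev_activation_regs[r][: C - 1] if C > 1 else []
--             acts.append([act_edge(r)] + tail)
--         else:
--             acts.append([])
--
--     if C == 0:
--         wts = [[] for _ in range(R)]
--     elif R > 0:
--         wts = [[w_edge(c) for c in range(C)]]
--         for r in range(1, R):
--             wts.append(list(prev_weight_regs[r - 1][:C]))
--     else:
--         wts = []
--     return acts, wts
-- ===== Notes on version B (the rewrite author's own statement) =====
-- stated objective: simpler
-- what changed: B assembles each tile row-at-a-time (broadcast rows in preload; an edge value consed onto a slice of the previous activation row, and an edge row on top of copies of the previous weight rows when streaming) instead of A's per-cell nested loops with inner col==0/row==0 tests over pre-built zero matrices.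
import Mathlib
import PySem

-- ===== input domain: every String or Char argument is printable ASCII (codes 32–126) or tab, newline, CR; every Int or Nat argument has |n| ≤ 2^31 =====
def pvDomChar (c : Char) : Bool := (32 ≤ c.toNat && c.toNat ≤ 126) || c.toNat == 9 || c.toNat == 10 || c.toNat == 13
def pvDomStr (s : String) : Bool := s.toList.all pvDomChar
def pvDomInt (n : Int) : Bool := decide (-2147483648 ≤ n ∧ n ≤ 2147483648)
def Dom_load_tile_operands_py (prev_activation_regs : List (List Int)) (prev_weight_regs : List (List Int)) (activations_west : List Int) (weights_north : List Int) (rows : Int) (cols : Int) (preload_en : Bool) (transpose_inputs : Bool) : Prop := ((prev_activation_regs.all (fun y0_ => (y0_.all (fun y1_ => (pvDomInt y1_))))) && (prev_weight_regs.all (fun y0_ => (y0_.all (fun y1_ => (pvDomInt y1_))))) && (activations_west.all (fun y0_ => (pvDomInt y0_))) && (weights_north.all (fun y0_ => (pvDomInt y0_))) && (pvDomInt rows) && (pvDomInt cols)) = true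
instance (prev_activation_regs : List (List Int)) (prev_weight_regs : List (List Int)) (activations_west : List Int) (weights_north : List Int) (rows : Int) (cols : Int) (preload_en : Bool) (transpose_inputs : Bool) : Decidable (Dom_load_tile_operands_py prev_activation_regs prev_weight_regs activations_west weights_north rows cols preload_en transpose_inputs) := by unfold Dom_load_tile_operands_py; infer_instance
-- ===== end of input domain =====

-- B builds each register tile row-at-a-time (broadcast rows / one-step shifted rows / copied
-- rows) instead of A's per-cell nested loops with inner col==0/row==0 tests; objective: simpler.

-- ===== PORT A =====
-- m[r][c] = v  (Python's in-place assignment into a list-of-lists)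
def pvCellSet (m : List (List Int)) (r c : Nat) (v : Int) : List (List Int) :=
  m.set r ((m.getD r []).set c v)

def load_tile_operands_py (prev_activation_regs : List (List Int)) (prev_weight_regs : List (List Int)) (activations_west : List Int) (weights_north : List Int) (rows : Int) (cols : Int) (preload_en : Bool) (transpose_inputs : Bool) : List (List Int) × List (List Int) :=
  let na0 := (PySem.List.pyRange 0 rows 1).map (fun _ => (PySem.List.pyRange 0 cols 1).map (fun _ => (0 : Int)))
  let nw0 := (PySem.List.pyRange 0 rows 1).map (fun _ => (PySem.List.pyRange 0 cols 1).map (fun _ => (0 : Int)))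
  if preload_en then
    (PySem.List.pyRange 0 rows 1).foldl (fun s row =>
      (PySem.List.pyRange 0 cols 1).foldl (fun (s : List (List Int) × List (List Int)) col =>
        if transpose_inputs then
          (pvCellSet s.1 row.toNat col.toNat
             (if row < (weights_north.length : Int) then PySem.List.pyGetD weights_north row 0 else 0),
           pvCellSet s.2 row.toNat col.toNat
             (if col < (activations_west.length : Int) then PySem.List.pyGetD activations_west col 0 else 0))
        else
          (pvCellSet s.1 row.toNat col.toNat
             (if row < (activations_west.length : Int) then PySem.List.pyGetD activations_west row 0 else 0),
           pvCellSet s.2 row.toNat col.toNat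
             (if col < (weights_north.length : Int) then PySem.List.pyGetD weights_north col 0 else 0))) s)
      (na0, nw0)
  else
    let na := (PySem.List.pyRange 0 rows 1).foldl (fun m row =>
      (PySem.List.pyRange 0 cols 1).foldl (fun m col =>
        pvCellSet m row.toNat col.toNat
          (if col = 0 then
            (if transpose_inputs = true ∧ row < (weights_north.length : Int) then PySem.List.pyGetD weights_north row 0
             else if row < (activations_west.length : Int) then PySem.List.pyGetD activations_west row 0 else 0)
           else PySem.List.pyGetD (PySem.List.pyGetD prev_activation_regs row []) (col - 1) 0)) m) na0
    let nw := (PySem.List.pyRange 0 rows 1).foldl (fun m row =>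
      (PySem.List.pyRange 0 cols 1).foldl (fun m col =>
        pvCellSet m row.toNat col.toNat
          (if row = 0 then
            (if transpose_inputs = true ∧ col < (activations_west.length : Int) then PySem.List.pyGetD activations_west col 0
             else if col < (weights_north.length : Int) then PySem.List.pyGetD weights_north col 0 else 0)
           else PySem.List.pyGetD (PySem.List.pyGetD prev_weight_regs (row - 1) []) col 0)) m) nw0
    (na, nw)

-- ===== PORT B =====
def pvActEdge (activations_west weights_north : List Int) (transpose : Bool) (r : Nat) : Int :=
  if transpose = true ∧ r < weights_north.length then weights_north.getD r 0
  else if r < activations_west.length then activations_west.getD r 0 else 0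

def pvWEdge (activations_west weights_north : List Int) (transpose : Bool) (c : Nat) : Int :=
  if transpose = true ∧ c < activations_west.length then activations_west.getD c 0
  else if c < weights_north.length then weights_north.getD c 0 else 0

def load_tile_operands_py_alt (prev_activation_regs : List (List Int)) (prev_weight_regs : List (List Int)) (activations_west : List Int) (weights_north : List Int) (rows : Int) (cols : Int) (preload_en : Bool) (transpose_inputs : Bool) : List (List Int) × List (List Int) :=
  let R := rows.toNat  -- R = max(rows, 0)
  let C := cols.toNat  -- C = max(cols, 0)
  if preload_en then
    let rowVals :=
      if transpose_inputs then
        (List.range R).map (fun r => if r < weights_north.length then weights_north.getD r 0 else 0)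
      else
        (List.range R).map (fun r => if r < activations_west.length then activations_west.getD r 0 else 0)
    let colVals :=
      if transpose_inputs then
        (List.range C).map (fun c => if c < activations_west.length then activations_west.getD c 0 else 0)
      else
        (List.range C).map (fun c => if c < weights_north.length then weights_north.getD c 0 else 0)
    (rowVals.map (fun v => List.replicate C v), (List.range R).map (fun _ => colVals))
  else
    let acts := (List.range R).map (fun r =>
      if 0 < C then
        pvActEdge activations_west weights_north transpose_inputs r ::
          (if 1 < C then (prev_activation_regs.getD r []).take (C - 1) else [])
      else [])
    let wts :=
      if C = 0 then (List.range R).map (fun _ => ([] : List Int))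
      else if 0 < R then
        ((List.range C).map (pvWEdge activations_west weights_north transpose_inputs)) ::
          (List.range (R - 1)).map (fun r => (prev_weight_regs.getD r []).take C)
      else []
    (acts, wts)

-- ===== PRECONDITION & SPEC =====
-- Pre_ excludes exactly the inputs on which A raises IndexError: in the streaming branch A reads
-- prev_activation_regs[row][0..cols-2] (when cols ≥ 2) and prev_weight_regs[row-1][0..cols-1]
-- (when cols ≥ 1 and row ≥ 1), so those rows must exist and be long enough.
def Pre_load_tile_operands_py (prev_activation_regs : List (List Int)) (prev_weight_regs : List (List Int)) (activations_west : List Int) (weights_north : List Int) (rows : Int) (cols : Int) (preload_en : Bool) (transpose_inputs : Bool) : Prop :=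
  preload_en = true ∨
  ((2 ≤ cols → rows ≤ (prev_activation_regs.length : Int) ∧
      ∀ row ∈ prev_activation_regs.take rows.toNat, cols - 1 ≤ (row.length : Int))
   ∧ (1 ≤ cols → rows - 1 ≤ (prev_weight_regs.length : Int) ∧
      ∀ row ∈ prev_weight_regs.take (rows.toNat - 1), cols ≤ (row.length : Int)))
instance (prev_activation_regs : List (List Int)) (prev_weight_regs : List (List Int)) (activations_west : List Int) (weights_north : List Int) (rows : Int) (cols : Int) (preload_en : Bool) (transpose_inputs : Bool) : Decidable (Pre_load_tile_operands_py prev_activation_regs prev_weight_regs activations_west weights_north rows cols preload_en transpose_inputs) := by unfold Pre_load_tile_operands_py; infer_instance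

def pvWitness_load_tile_operands_py : List (List Int) × List (List Int) × List Int × List Int × Int × Int × Bool × Bool :=
  ([[1, 2], [3, 4]], [[5, 6], [7, 8]], [9, 10], [11, 12], 2, 2, false, false)

def Spec_load_tile_operands_py (prev_activation_regs : List (List Int)) (prev_weight_regs : List (List Int)) (activations_west : List Int) (weights_north : List Int) (rows : Int) (cols : Int) (preload_en : Bool) (transpose_inputs : Bool) (out : List (List Int) × List (List Int)) : Prop := out = load_tile_operands_py_alt prev_activation_regs prev_weight_regs activations_west weights_north rows cols preload_en transpose_inputs
instance (prev_activation_regs : List (List Int)) (prev_weight_regs : List (List Int)) (activations_west : List Int) (weights_north : List Int) (rows : Int) (cols : Int) (preload_en : Bool) (transpose_inputs : Bool) (out : List (List Int) × List (List Int)) : Decidable (Spec_load_tile_operands_py prev_activation_regs prev_weight_regs activations_west weights_north rows cols preload_en transpose_inputs out) := by unfold Spec_load_tile_operands_py; infer_instance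

-- ===== CLAIM (what is proved, stated in full; the proofs are below) =====
def Claim_equal_load_tile_operands_py : Prop := ∀ (prev_activation_regs : List (List Int)) (prev_weight_regs : List (List Int)) (activations_west : List Int) (weights_north : List Int) (rows : Int) (cols : Int) (preload_en : Bool) (transpose_inputs : Bool), Dom_load_tile_operands_py prev_activation_regs prev_weight_regs activations_west weights_north rows cols preload_en transpose_inputs → Pre_load_tile_operands_py prev_activation_regs prev_weight_regs activations_west weights_north rows cols preload_en transpose_inputs → Spec_load_tile_operands_py prev_activation_regs prev_weight_regs activations_west weights_north rows cols preload_en transpose_inputs (load_tile_operands_py prev_activation_regs prev_weight_regs activations_west weights_north rows cols preload_en transpose_inputs)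

-- ===== LEMMAS AND PROOFS =====

theorem pvSetGetD (m : List (List Int)) (r : Nat) : m.set r (m.getD r []) = m := by
  by_cases h : r < m.length
  · rw [List.getD_eq_getElem m [] h]; exact List.set_getElem_self h
  · exact List.set_eq_of_length_le (Nat.le_of_not_lt h)

theorem pvCellSet_set (m : List (List Int)) (x : List Int) (r c : Nat) (v : Int) :
    pvCellSet (m.set r x) r c v = m.set r (x.set c v) := by
  unfold pvCellSet
  by_cases h : r < m.length
  · rw [List.getD_eq_getElem _ [] (by simpa using h)]
    simp [List.set_set]
  · rw [List.set_eq_of_length_le (Nat.le_of_not_lt h),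
        List.set_eq_of_length_le (Nat.le_of_not_lt h),
        List.set_eq_of_length_le (Nat.le_of_not_lt h)]

theorem pvInnerFill (C : Nat) (m : List (List Int)) (r : Nat) (f : Nat → Int) :
    (List.range C).foldl (fun m c => pvCellSet m r c (f c)) m
      = m.set r ((List.range C).foldl (fun row c => row.set c (f c)) (m.getD r [])) := by
  induction C with
  | zero => simp only [List.range_zero, List.foldl_nil]; exact (pvSetGetD m r).symm
  | succ n ih =>
      rw [List.range_succ, List.foldl_append, ih]
      simp [pvCellSet_set]


theorem pvRowFill (g : Nat → Int) : ∀ (k : Nat) (l : List Int), k ≤ l.length →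
    (List.range k).foldl (fun row c => row.set c (g c)) l = (List.range k).map g ++ l.drop k := by
  intro k
  induction k with
  | zero => simp
  | succ n ih =>
      intro l h
      rw [List.range_succ, List.foldl_append, ih l (by omega)]
      have hd : l.drop n = l[n] :: l.drop (n + 1) := List.drop_eq_getElem_cons (by omega)
      rw [hd]
      simp only [List.foldl_cons, List.foldl_nil, List.map_append, List.map_cons, List.map_nil]
      rw [List.set_append_right _ _ (by simp)]
      simp only [List.length_map, List.length_range, Nat.sub_self, List.set_cons_zero,
        List.append_assoc, List.cons_append, List.nil_append]

theorem pvFill2 (g : Nat → Nat → Int) (C : Nat) : ∀ (k : Nat) (m : List (List Int)),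
    k ≤ m.length → (∀ row ∈ m, row.length = C) →
    (List.range k).foldl (fun m r => (List.range C).foldl (fun m c => pvCellSet m r c (g r c)) m) m
      = (List.range k).map (fun r => (List.range C).map (g r)) ++ m.drop k := by
  intro k
  induction k with
  | zero => simp
  | succ n ih =>
      intro m h hrow
      rw [List.range_succ, List.foldl_append, ih m (by omega) hrow]
      simp only [List.foldl_cons, List.foldl_nil]
      set pre := (List.range n).map (fun r => (List.range C).map (g r)) with hpre
      obtain ⟨x, hd, hxl⟩ : ∃ x, m.drop n = x :: m.drop (n + 1) ∧ x.length = C :=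
        ⟨m[n], List.drop_eq_getElem_cons (by omega), hrow m[n] (List.getElem_mem _)⟩
      rw [hd, pvInnerFill]
      have hget : (pre ++ x :: m.drop (n + 1)).getD n [] = x := by
        rw [List.getD_eq_getElem _ _ (by simp [hpre])]
        rw [List.getElem_append_right (by simp [hpre])]
        simp [hpre]
      rw [hget, pvRowFill (g n) C x (le_of_eq hxl.symm)]
      rw [List.drop_eq_nil_of_le (le_of_eq hxl), List.append_nil]
      rw [List.set_append_right _ _ (by simp [hpre])]
      simp [hpre, List.map_append, List.range_succ]

-- A's preload loop updates the two tiles independently: split the pair fold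
theorem pvPairFill (V1 V2 : Int → Int → Int) (lo lc : List Int) :
    ∀ (s : List (List Int) × List (List Int)),
    lo.foldl (fun s row => lc.foldl (fun s col =>
        (pvCellSet s.1 row.toNat col.toNat (V1 row col),
         pvCellSet s.2 row.toNat col.toNat (V2 row col))) s) s
      = (lo.foldl (fun m row => lc.foldl (fun m col => pvCellSet m row.toNat col.toNat (V1 row col)) m) s.1,
         lo.foldl (fun m row => lc.foldl (fun m col => pvCellSet m row.toNat col.toNat (V2 row col)) m) s.2) := by
  have inner : ∀ (row : Int) (s : List (List Int) × List (List Int)),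
      lc.foldl (fun s col =>
          (pvCellSet s.1 row.toNat col.toNat (V1 row col),
           pvCellSet s.2 row.toNat col.toNat (V2 row col))) s
        = (lc.foldl (fun m col => pvCellSet m row.toNat col.toNat (V1 row col)) s.1,
           lc.foldl (fun m col => pvCellSet m row.toNat col.toNat (V2 row col)) s.2) := by
    induction lc with
    | nil => intro row s; rfl
    | cons h t ih => intro row s; simp only [List.foldl_cons]; exact ih row _
  induction lo with
  | nil => intro s; rfl
  | cons h t ih =>
      intro s
      simp only [List.foldl_cons, inner h s]
      exact ih _

theorem pvMapGetD_eq_take (l : List Int) (k : Nat) (h : k ≤ l.length) :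
    (List.range k).map (fun c => l.getD c 0) = l.take k := by
  apply List.ext_getElem
  · simp [Nat.min_eq_left h]
  · intro i h1 h2
    simp only [List.length_map, List.length_range] at h1
    simp only [List.getElem_map, List.getElem_range, List.getElem_take]
    rw [List.getD_eq_getElem _ _ (by omega)]

theorem pvAFill (f : Int → Int → Int) (rows cols : Int) :
    (PySem.List.pyRange 0 rows 1).foldl (fun m row =>
        (PySem.List.pyRange 0 cols 1).foldl (fun m col =>
          pvCellSet m row.toNat col.toNat (f row col)) m)
      ((PySem.List.pyRange 0 rows 1).map (fun _ => (PySem.List.pyRange 0 cols 1).map (fun _ => (0 : Int))))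
      = (List.range rows.toNat).map (fun r : Nat => (List.range cols.toNat).map (fun c : Nat => f r c)) := by
  rw [PySem.List.pyRange_one 0 rows, PySem.List.pyRange_one 0 cols]
  simp only [Int.sub_zero, zero_add, List.foldl_map, List.map_map, Function.comp_def,
    Int.toNat_natCast]
  rw [pvFill2 (fun r c => f (r : Int) (c : Int)) cols.toNat rows.toNat
        ((List.range rows.toNat).map (fun _ => (List.range cols.toNat).map (fun _ => (0 : Int))))
        (by simp) (by intro row hrow; simp only [List.mem_map] at hrow; obtain ⟨_, _, hr⟩ := hrow; simp [← hr])]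
  rw [List.drop_eq_nil_of_le (by simp), List.append_nil]

-- ===== VERDICT (by name: the statement is the Claim_ definition above) =====
theorem load_tile_operands_py_spec : Claim_equal_load_tile_operands_py := by
  intro pa pw aw wn rows cols preload transpose hdom hpre
  unfold Spec_load_tile_operands_py
  cases preload with
  | true =>
      cases transpose with
      | true =>
          simp only [load_tile_operands_py, load_tile_operands_py_alt, if_true]
          rw [pvPairFill]
          dsimp only
          rw [pvAFill, pvAFill]
          simp [List.map_map, Function.comp_def, PySem.List.pyGetD_natCast, Nat.cast_lt,
            List.map_const', List.length_range]
      | false =>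
          simp only [load_tile_operands_py, load_tile_operands_py_alt, if_true,
            Bool.false_eq_true, if_false]
          rw [pvPairFill]
          dsimp only
          rw [pvAFill, pvAFill]
          simp [List.map_map, Function.comp_def, PySem.List.pyGetD_natCast, Nat.cast_lt,
            List.map_const', List.length_range]
  | false =>
      rcases hpre with h | ⟨hA0, hW0⟩
      · exact absurd h (by simp)
      have hA : ∀ r : Nat, r < rows.toNat → 2 ≤ cols →
          r < pa.length ∧ cols - 1 ≤ ((pa.getD r []).length : Int) := by
        intro r hr h2
        obtain ⟨hlen, hall⟩ := hA0 h2
        have hrp : r < pa.length := by omega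
        refine ⟨hrp, hall _ ?_⟩
        rw [List.getD_eq_getElem pa [] hrp]
        have hix : r < (pa.take rows.toNat).length := by simp [List.length_take]; omega
        have := List.getElem_take (xs := pa) (j := rows.toNat) (h := hix)
        rw [← this]
        exact List.getElem_mem _
      have hW : ∀ r : Nat, r < rows.toNat - 1 → 1 ≤ cols →
          r < pw.length ∧ cols ≤ ((pw.getD r []).length : Int) := by
        intro r hr h1
        obtain ⟨hlen, hall⟩ := hW0 h1
        have hrp : r < pw.length := by omega
        refine ⟨hrp, hall _ ?_⟩
        rw [List.getD_eq_getElem pw [] hrp]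
        have hix : r < (pw.take (rows.toNat - 1)).length := by simp [List.length_take]; omega
        have := List.getElem_take (xs := pw) (j := rows.toNat - 1) (h := hix)
        rw [← this]
        exact List.getElem_mem _
      simp only [load_tile_operands_py, load_tile_operands_py_alt, Bool.false_eq_true, if_false]
      rw [pvAFill, pvAFill]
      simp only [Prod.mk.injEq]
      constructor
      · -- activation tile: edge column followed by shifted previous rows
        apply List.map_congr_left
        intro r hr
        rw [List.mem_range] at hr
        rcases Nat.eq_zero_or_pos cols.toNat with hC | hC
        · simp [hC]
        · obtain ⟨C', hC'⟩ : ∃ C', cols.toNat = C' + 1 := ⟨cols.toNat - 1, by omega⟩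
          rw [hC', List.range_succ_eq_map]
          simp only [List.map_cons, List.map_map, Function.comp_def, Nat.cast_zero,
            if_pos rfl]
          rw [if_pos (by omega : 0 < C' + 1)]
          congr 1
          · simp [pvActEdge, PySem.List.pyGetD_natCast, Nat.cast_lt]
          · have hne : ∀ c : Nat, ((c + 1 : Nat) : Int) ≠ 0 := by intro c; omega
            simp only [hne, if_false]
            have hsub : ∀ c : Nat, ((c + 1 : Nat) : Int) - 1 = (c : Int) := by intro c; omega
            simp only [hsub, PySem.List.pyGetD_natCast]
            rcases Nat.eq_zero_or_pos C' with h0 | h0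
            · simp [h0]
            · rw [if_pos (by omega : 1 < C' + 1)]
              have hlen := hA r hr (by omega)
              exact pvMapGetD_eq_take _ _ (by omega)
      · -- weight tile: edge row on top of the previous rows
        rcases Nat.eq_zero_or_pos cols.toNat with hC | hC
        · simp [hC]
        · rw [if_neg (by omega)]
          rcases Nat.eq_zero_or_pos rows.toNat with hR | hR
          · simp [hR]
          · obtain ⟨R', hR'⟩ : ∃ R', rows.toNat = R' + 1 := ⟨rows.toNat - 1, by omega⟩
            rw [hR', List.range_succ_eq_map, if_pos (by omega)]
            simp only [List.map_cons, List.map_map, Function.comp_def, Nat.cast_zero, if_pos rfl]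
            congr 1
            · simp [pvWEdge, PySem.List.pyGetD_natCast, Nat.cast_lt]
            · simp only [Nat.add_sub_cancel]
              apply List.map_congr_left
              intro r hr
              rw [List.mem_range] at hr
              have hne : ∀ k : Nat, ((k + 1 : Nat) : Int) ≠ 0 := by intro k; omega
              have hsub : ∀ k : Nat, ((k + 1 : Nat) : Int) - 1 = (k : Int) := by intro k; omega
              simp only [hne, if_false, hsub, PySem.List.pyGetD_natCast]
              have hlen := hW r (by omega) (by omega)
              exact pvMapGetD_eq_take _ _ (by omega)
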